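-- pv_equiv track=rewrite | github.com/HyeBin-Hub/Problem_Solving_Algorithm_ | Programmers_Solving_/비밀 지도/비밀 지도.py | solution
-- ===== SOURCE A (Python) =====
-- def solution(n, arr1, arr2):
--
--     answer=[[" "]*n for _ in range(n)]
--
--     for ind,i in enumerate(arr1):
--         a=list(format(i,"b").zfill(n))
--         for ind2,j in enumerate(a):
--             if j=="1":
--                 answer[ind][ind2]="#"
--
--     for ind,i in enumerate(arr2):
--         a=list(format(i,"b").zfill(n))
--         for ind2,j in enumerate(a):
--             if j=="1":
--                 answer[ind][ind2]="#"
--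
--     for ind, i in enumerate(answer):
--         answer[ind]="".join(i)
--
--     return answer
-- ===== SOURCE B (Python) =====
-- def solution(n, arr1, arr2):
--     def row(i):
--         s1 = format(arr1[i] if i < len(arr1) else 0, "b").zfill(n)
--         s2 = format(arr2[i] if i < len(arr2) else 0, "b").zfill(n)
--         return "".join("#" if c1 == "1" or c2 == "1" else " " for c1, c2 in zip(s1, s2))
--     return [row(i) for i in range(n)]
-- ===== Notes on version B (the rewrite author's own statement) =====
-- stated objective: simpler
-- what changed: B replaces A's three passes over a mutable n-by-n character grid (blank grid, one '#'-marking pass per bitmap, a join pass) by a single pass over the row indices that renders each row directly from the two zero-filled binary strings, combined character-wise; Pre_ excludes inputs where a nonzero entry sits beyond row n or renders wider than n columns, where A raises IndexError except accidentally when every '1' character still lands inside the grid.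
-- outside the precondition, e.g. on solution(2, [8], [8]): A returns ['# ', '  '], B returns ['#   ', '  ']
import Mathlib
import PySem

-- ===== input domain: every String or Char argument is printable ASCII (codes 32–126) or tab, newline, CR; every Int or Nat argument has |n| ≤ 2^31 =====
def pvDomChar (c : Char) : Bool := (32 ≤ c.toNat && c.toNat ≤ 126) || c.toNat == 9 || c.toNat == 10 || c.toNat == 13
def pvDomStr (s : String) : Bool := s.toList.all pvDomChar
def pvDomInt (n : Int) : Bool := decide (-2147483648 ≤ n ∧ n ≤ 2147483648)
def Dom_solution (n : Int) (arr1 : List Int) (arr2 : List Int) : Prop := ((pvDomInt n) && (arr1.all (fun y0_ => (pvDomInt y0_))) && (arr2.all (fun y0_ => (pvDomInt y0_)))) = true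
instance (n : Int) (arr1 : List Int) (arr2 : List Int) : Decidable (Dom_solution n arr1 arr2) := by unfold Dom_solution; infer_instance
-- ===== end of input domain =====

-- B renders each row directly from the two zero-filled binary strings in one pass,
-- instead of A's three passes over a mutable n×n character grid (objective: simpler).

-- ===== PORT A =====
-- one inner-loop step of A: `if j=="1": answer[ind][ind2]="#"` (pySetD/pyGetD are exact where
-- the index is in range; under Pre_ the indices are always in range, exactly where Python does not raise IndexError)
def pvRowStep (ind : Int) (ans : List (List Char)) (p : Int × Char) : List (List Char) :=
  if p.2 = '1' then
    PySem.List.pySetD ans ind (PySem.List.pySetD (PySem.List.pyGetD ans ind []) p.1 '#')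
  else ans

-- one of A's two identical marking loops:
-- `for ind,i in enumerate(arr): a=list(format(i,"b").zfill(n)); for ind2,j in enumerate(a): …`
def pvScan (n : Int) (arr : List Int) (ans : List (List Char)) : List (List Char) :=
  (PySem.List.enumerate arr).foldl
    (fun ans q =>
      (PySem.List.enumerate (PySem.Chars.zfill (PySem.Int.toBinChars q.2) n)).foldl
        (pvRowStep q.1) ans)
    ans

def solution (n : Int) (arr1 : List Int) (arr2 : List Int) : List String :=
  -- answer=[[" "]*n for _ in range(n)]; marking loop over arr1, then over arr2;
  -- the final loop `answer[ind]="".join(i)` joins each char row into a string (String.ofList is exact)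
  (pvScan n arr2 (pvScan n arr1 (List.replicate n.toNat (List.replicate n.toNat ' ')))).map
    (fun row => String.ofList row)

-- ===== PORT B =====
-- Source B's row(i): the two zero-filled binary strings, combined character-wise
def pvRow (n : Int) (arr1 : List Int) (arr2 : List Int) (i : Nat) : String :=
  let s1 := PySem.Chars.zfill (PySem.Int.toBinChars (arr1.getD i 0)) n
  let s2 := PySem.Chars.zfill (PySem.Int.toBinChars (arr2.getD i 0)) n
  String.ofList ((s1.zip s2).map (fun p => if p.1 = '1' ∨ p.2 = '1' then '#' else ' '))

def solution_alt (n : Int) (arr1 : List Int) (arr2 : List Int) : List String :=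
  (List.range n.toNat).map (pvRow n arr1 arr2)

-- ===== PRECONDITION & SPEC =====
-- Pre_ excludes inputs where a nonzero entry sits beyond row n or renders wider than n columns:
-- there A raises IndexError, except accidentally when every '1' character still lands inside the
-- grid (A only writes on '1' chars), and that surviving value is an artefact of A's char-by-char
-- writes which B (reading exactly n columns) does not reproduce.
def Pre_solution (n : Int) (arr1 : List Int) (arr2 : List Int) : Prop :=
  (∀ v ∈ arr1.drop n.toNat, v = 0) ∧ (∀ v ∈ arr2.drop n.toNat, v = 0) ∧
  ∀ v ∈ arr1 ++ arr2, v ≠ 0 → (PySem.Int.toBinChars v).length ≤ n.toNat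

instance (n : Int) (arr1 : List Int) (arr2 : List Int) : Decidable (Pre_solution n arr1 arr2) := by
  unfold Pre_solution; infer_instance

def pvWitness_solution : Int × List Int × List Int := (2, [1], [2])

def Spec_solution (n : Int) (arr1 : List Int) (arr2 : List Int) (out : List String) : Prop :=
  out = solution_alt n arr1 arr2

instance (n : Int) (arr1 : List Int) (arr2 : List Int) (out : List String) :
    Decidable (Spec_solution n arr1 arr2 out) := by unfold Spec_solution; infer_instance

-- ===== CLAIM (what is proved, stated in full; the proofs are below) =====
def Claim_equal_solution : Prop := ∀ (n : Int) (arr1 : List Int) (arr2 : List Int),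
  Dom_solution n arr1 arr2 → Pre_solution n arr1 arr2 →
  Spec_solution n arr1 arr2 (solution n arr1 arr2)

-- ===== LEMMAS AND PROOFS =====

-- row-level form of A's inner loop (proof-side helper)
def pvRF (a : List Char) (s : Int) (row : List Char) : List Char :=
  (PySem.List.enumerate a s).foldl
    (fun r (p : Int × Char) => if p.2 = '1' then PySem.List.pySetD r p.1 '#' else r) row

theorem pvRF_cons (c : Char) (a : List Char) (s : Int) (row : List Char) :
    pvRF (c :: a) s row
      = pvRF a (s + 1) (if c = '1' then PySem.List.pySetD row s '#' else row) := by
  by_cases hc : c = '1' <;>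
    simp only [pvRF, PySem.List.enumerate_cons, List.foldl_cons, hc, if_true, if_false]

theorem pvRF_length (a : List Char) (k : Nat) (row : List Char) :
    (pvRF a (k : Int) row).length = row.length := by
  induction a generalizing k row with
  | nil => simp [pvRF, PySem.List.enumerate_nil]
  | cons c a ih =>
      rw [pvRF_cons, show (k : Int) + 1 = ((k + 1 : Nat) : Int) by push_cast; ring, ih]
      split <;> simp

theorem pvRF_getD (a : List Char) (k : Nat) (row : List Char) (j : Nat)
    (h : k + a.length ≤ row.length) :
    (pvRF a (k : Int) row).getD j ' ' =
      if k ≤ j ∧ j < k + a.length ∧ a.getD (j - k) ' ' = '1' then '#' else row.getD j ' ' := by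
  induction a generalizing k row with
  | nil =>
      simp only [pvRF, PySem.List.enumerate_nil, List.foldl_nil, List.length_nil]
      rw [if_neg]; rintro ⟨h1, h2, -⟩; omega
  | cons c a ih =>
      rw [pvRF_cons, show (k : Int) + 1 = ((k + 1 : Nat) : Int) by push_cast; ring,
        PySem.List.pySetD_natCast]
      have hklt : k < row.length := by simp at h; omega
      set row' : List Char := if c = '1' then row.set k '#' else row with hrow'
      have hlen' : row'.length = row.length := by rw [hrow']; split <;> simp
      have hb : (k + 1) + a.length ≤ row'.length := by
        rw [hlen']; simp at h ⊢; omega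
      rw [ih (k + 1) row' hb]
      have hrowj : j ≠ k → row'.getD j ' ' = row.getD j ' ' := by
        intro hj; rw [hrow']; split
        · rw [List.getD_eq_getElem?_getD, List.getD_eq_getElem?_getD,
            List.getElem?_set_ne (fun he => hj he.symm)]
        · rfl
      by_cases hjk : j = k
      · subst hjk
        rw [if_neg (by omega)]
        have hrj : row'.getD j ' ' = if c = '1' then '#' else row.getD j ' ' := by
          rw [hrow']; split
          · rw [List.getD_eq_getElem?_getD, List.getElem?_set_self hklt]; rfl
          · rfl
        rw [hrj]
        have hc0 : (c :: a).getD (j - j) ' ' = c := by simp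
        by_cases hc : c = '1'
        · rw [if_pos hc, if_pos ⟨le_refl _, by simp, by rw [hc0]; exact hc⟩]
        · rw [if_neg hc, if_neg (by rintro ⟨-, -, hx⟩; rw [hc0] at hx; exact hc hx)]
      · rw [hrowj hjk]
        by_cases hlt : j < k
        · rw [if_neg (by omega), if_neg (by rintro ⟨h1, -, -⟩; omega)]
        · have hga : (c :: a).getD (j - k) ' ' = a.getD (j - (k + 1)) ' ' := by
            rw [show j - k = (j - (k + 1)) + 1 by omega]
            exact List.getD_cons_succ ..
          refine if_congr ?_ rfl rfl
          rw [hga, List.length_cons]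
          constructor <;> (rintro ⟨h1, h2, h3⟩; exact ⟨by omega, by omega, h3⟩)

theorem pvRF_length0 (a : List Char) (row : List Char) :
    (pvRF a (0 : Int) row).length = row.length := by
  have := pvRF_length a 0 row; simpa using this

theorem pvRF_getD0 (a : List Char) (row : List Char) (j : Nat) (h : a.length ≤ row.length) :
    (pvRF a (0 : Int) row).getD j ' ' =
      if j < a.length ∧ a.getD j ' ' = '1' then '#' else row.getD j ' ' := by
  have := pvRF_getD a 0 row j (by simpa using h)
  simpa using this

theorem pvRF_zeros (N : Nat) (row : List Char) (h : N ≤ row.length) :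
    pvRF (List.replicate N '0') (0 : Int) row = row := by
  apply List.ext_getElem (pvRF_length0 _ _)
  intro j h1 h2
  have hg := pvRF_getD0 (List.replicate N '0') row j (by simpa using h)
  have hz : (List.replicate N '0').getD j ' ' ≠ '1' := by
    rw [List.getD_eq_getElem?_getD, List.getElem?_replicate]
    split <;> decide
  rw [if_neg (by rintro ⟨-, hx⟩; exact hz hx)] at hg
  rw [← List.getD_eq_getElem (pvRF _ _ _) ' ' h1, hg, List.getD_eq_getElem row ' ' h2]

-- A's inner loop on the grid only rewrites row `ind`
theorem pv_lift (a : List Char) (k : Nat) (ans : List (List Char)) (ind : Nat)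
    (hind : ind < ans.length) :
    (PySem.List.enumerate a (k : Int)).foldl (pvRowStep (ind : Int)) ans
      = ans.set ind (pvRF a (k : Int) (ans.getD ind [])) := by
  induction a generalizing k ans with
  | nil =>
      simp only [PySem.List.enumerate_nil, List.foldl_nil, pvRF]
      rw [List.getD_eq_getElem ans [] hind, List.set_getElem_self]
  | cons c a ih =>
      rw [show PySem.List.enumerate (c :: a) (k : Int)
            = ((k : Int), c) :: PySem.List.enumerate a ((k : Int) + 1)
          from PySem.List.enumerate_cons .., List.foldl_cons, pvRF_cons,
        show (k : Int) + 1 = ((k + 1 : Nat) : Int) by push_cast; ring]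
      by_cases hc : c = '1'
      · have hstep : pvRowStep (ind : Int) ans ((k : Int), c)
            = ans.set ind ((ans.getD ind []).set k '#') := by
          simp only [pvRowStep, hc, if_true, PySem.List.pySetD_natCast,
            PySem.List.pyGetD_natCast]
        rw [hstep, ih (k + 1) _ (by simpa using hind)]
        rw [List.set_set,
          show (ans.set ind ((ans.getD ind []).set k '#')).getD ind []
              = (ans.getD ind []).set k '#' by
            rw [List.getD_eq_getElem?_getD, List.getElem?_set_self hind]; rfl]
        simp only [hc, if_true, PySem.List.pySetD_natCast]
      · have hstep : pvRowStep (ind : Int) ans ((k : Int), c) = ans := by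
          simp only [pvRowStep, hc, if_false]
        rw [hstep, ih (k + 1) _ hind]
        simp only [hc, if_false]

theorem pv_lift0 (a : List Char) (ans : List (List Char)) (ind : Nat)
    (hind : ind < ans.length) :
    (PySem.List.enumerate a (0 : Int)).foldl (pvRowStep (ind : Int)) ans
      = ans.set ind (pvRF a (0 : Int) (ans.getD ind [])) := by
  have := pv_lift a 0 ans ind hind; simpa using this

theorem pv_inner_length (ps : List (Int × Char)) (ind : Int) (ans : List (List Char)) :
    (ps.foldl (pvRowStep ind) ans).length = ans.length := by
  induction ps generalizing ans with
  | nil => rfl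
  | cons p ps ih =>
      rw [List.foldl_cons, ih]
      unfold pvRowStep; split <;> simp [PySem.List.length_pySetD]

theorem pv_scan_length (n : Int) (arr : List Int) (s : Nat) (ans : List (List Char)) :
    ((PySem.List.enumerate arr (s : Int)).foldl
        (fun ans q =>
          (PySem.List.enumerate (PySem.Chars.zfill (PySem.Int.toBinChars q.2) n)).foldl
            (pvRowStep q.1) ans) ans).length = ans.length := by
  induction arr generalizing s ans with
  | nil => rfl
  | cons v arr ih =>
      rw [show PySem.List.enumerate (v :: arr) (s : Int)
            = ((s : Int), v) :: PySem.List.enumerate arr ((s : Int) + 1)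
          from PySem.List.enumerate_cons .., List.foldl_cons,
        show (s : Int) + 1 = ((s + 1 : Nat) : Int) by push_cast; ring, ih]
      exact pv_inner_length _ _ _

-- A's inner loop writes nothing when the string has no '1' characters
theorem pv_inner_id (a : List Char) (t : Int) (ind : Int) (ans : List (List Char))
    (hall : ∀ c ∈ a, c ≠ '1') :
    (PySem.List.enumerate a t).foldl (pvRowStep ind) ans = ans := by
  induction a generalizing t ans with
  | nil => rfl
  | cons c a ih =>
      rw [PySem.List.enumerate_cons, List.foldl_cons,
        show pvRowStep ind ans (t, c) = ans from by
          simp only [pvRowStep, if_neg (hall c List.mem_cons_self)]]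
      exact ih (t + 1) ans (fun c hc => hall c (List.mem_cons_of_mem _ hc))

theorem pv_zfill_zero (n : Int) (h : 1 ≤ n.toNat) :
    PySem.Chars.zfill (PySem.Int.toBinChars 0) n = List.replicate n.toNat '0' := by
  rw [show PySem.Int.toBinChars 0 = ['0'] from by decide]
  unfold PySem.Chars.zfill
  simp only [List.length_cons, List.length_nil]
  split
  · have h1 : n.toNat = 1 := by omega
    rw [h1]; rfl
  · rw [if_neg (show ¬('0' = '+' ∨ '0' = '-') from by decide)]
    rw [show n.toNat = (n.toNat - 1) + 1 by omega, List.replicate_succ']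
    simp

theorem pv_zfill_zero_mem (n : Int) (c : Char)
    (hc : c ∈ PySem.Chars.zfill (PySem.Int.toBinChars 0) n) : c = '0' := by
  by_cases hN : 1 ≤ n.toNat
  · rw [pv_zfill_zero n hN] at hc
    exact List.eq_of_mem_replicate hc
  · rw [show PySem.Int.toBinChars 0 = ['0'] from by decide,
      show PySem.Chars.zfill ['0'] n = ['0'] from by
        unfold PySem.Chars.zfill; rw [if_pos (by simp; omega)]] at hc
    simpa using hc

theorem pv_drop_getD (arr : List Int) (N : Nat) (h : ∀ v ∈ arr.drop N, v = 0) :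
    ∀ k, N ≤ k → arr.getD k 0 = 0 := by
  intro k hk
  have he : (arr.drop N)[k - N]? = arr[k]? := by
    rw [List.getElem?_drop]; congr 1; omega
  rw [List.getD_eq_getElem?_getD, ← he]
  cases hod : (arr.drop N)[k - N]? with
  | none => rfl
  | some x => simpa using h x (List.mem_of_getElem? hod)

theorem pv_scan_getD (n : Int) (arr : List Int) (s : Nat) (ans : List (List Char))
    (h0 : ∀ k : Nat, ans.length ≤ s + k → arr.getD k 0 = 0) (i : Nat) (hi : i < ans.length) :
    ((PySem.List.enumerate arr (s : Int)).foldl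
        (fun ans q =>
          (PySem.List.enumerate (PySem.Chars.zfill (PySem.Int.toBinChars q.2) n)).foldl
            (pvRowStep q.1) ans) ans).getD i []
      = if s ≤ i ∧ i < s + arr.length then
          pvRF (PySem.Chars.zfill (PySem.Int.toBinChars (arr.getD (i - s) 0)) n) (0 : Int)
            (ans.getD i [])
        else ans.getD i [] := by
  induction arr generalizing s ans with
  | nil =>
      simp only [PySem.List.enumerate_nil, List.foldl_nil, List.length_nil]
      rw [if_neg]; rintro ⟨h1, h2⟩; omega
  | cons v arr ih =>
      rw [show PySem.List.enumerate (v :: arr) (s : Int)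
            = ((s : Int), v) :: PySem.List.enumerate arr ((s : Int) + 1)
          from PySem.List.enumerate_cons .., List.foldl_cons,
        show (s : Int) + 1 = ((s + 1 : Nat) : Int) by push_cast; ring]
      have h0' : ∀ k : Nat, ans.length ≤ (s + 1) + k → arr.getD k 0 = 0 := by
        intro k hk
        have := h0 (k + 1) (by omega)
        simpa using this
      by_cases hs : s < ans.length
      · rw [pv_lift0 _ ans s hs,
          ih (s + 1) _ (by simpa using h0') (by simpa using hi)]
        by_cases hjs : i = s
        · subst hjs
          rw [if_neg (by omega), if_pos ⟨le_refl _, by simp⟩]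
          simp only [List.getD_eq_getElem?_getD, List.getElem?_set_self hs, Option.getD_some,
            Nat.sub_self, List.getElem?_cons_zero]
        · have hset : (ans.set s (pvRF (PySem.Chars.zfill (PySem.Int.toBinChars v) n)
                (0 : Int) (ans.getD s []))).getD i [] = ans.getD i [] := by
            simp only [List.getD_eq_getElem?_getD, List.getElem?_set_ne (fun he => hjs he.symm)]
          rw [hset]
          by_cases hlt : i < s
          · rw [if_neg (by omega), if_neg (by rintro ⟨h1, -⟩; omega)]
          · have hga : (v :: arr).getD (i - s) 0 = arr.getD (i - (s + 1)) 0 := by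
              rw [show i - s = (i - (s + 1)) + 1 by omega]
              exact List.getD_cons_succ ..
            refine if_congr ?_ (by rw [hga]) rfl
            rw [List.length_cons]
            constructor <;> (rintro ⟨h1, h2⟩; exact ⟨by omega, by omega⟩)
      · have hv0 : v = 0 := by
          have := h0 0 (by omega)
          simpa using this
        rw [hv0, pv_inner_id _ _ _ ans
            (fun c hc => by rw [pv_zfill_zero_mem n c hc]; decide),
          ih (s + 1) ans h0' hi, if_neg (by omega), if_neg (by rintro ⟨h1, -⟩; omega)]

theorem pv_merge_rows (N : Nat) (a1 a2 : List Char) (h1 : a1.length = N) (h2 : a2.length = N) :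
    pvRF a2 (0 : Int) (pvRF a1 (0 : Int) (List.replicate N ' '))
      = (a1.zip a2).map (fun p => if p.1 = '1' ∨ p.2 = '1' then '#' else ' ') := by
  have l0 : (pvRF a1 (0 : Int) (List.replicate N ' ')).length = N := by
    rw [pvRF_length0]; simp
  have l1 : (pvRF a2 (0 : Int) (pvRF a1 (0 : Int) (List.replicate N ' '))).length = N := by
    rw [pvRF_length0]; exact l0
  apply List.ext_getElem (by simp [l1, h1, h2])
  intro j hj hj'
  have hjN : j < N := by rw [l1] at hj; exact hj
  rw [← List.getD_eq_getElem _ ' ' hj,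
    pvRF_getD0 a2 _ j (by omega),
    pvRF_getD0 a1 _ j (by simp; omega)]
  have hd1 : a1.getD j ' ' = a1[j]'(by omega) := List.getD_eq_getElem a1 ' ' (by omega)
  have hd2 : a2.getD j ' ' = a2[j]'(by omega) := List.getD_eq_getElem a2 ' ' (by omega)
  rw [List.getElem_map, List.getElem_zip]
  by_cases hx2 : a2[j]'(by omega) = '1'
  · rw [if_pos ⟨by omega, by rw [hd2]; exact hx2⟩]
    simp [hx2]
  · rw [if_neg (by rintro ⟨-, hc⟩; rw [hd2] at hc; exact hx2 hc)]
    by_cases hx1 : a1[j]'(by omega) = '1'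
    · rw [if_pos ⟨by omega, by rw [hd1]; exact hx1⟩]
      simp [hx1]
    · rw [if_neg (by rintro ⟨-, hc⟩; rw [hd1] at hc; exact hx1 hc)]
      have hor : ¬(a1[j]'(by omega) = '1' ∨ a2[j]'(by omega) = '1') := by
        rintro (hc | hc)
        · exact hx1 hc
        · exact hx2 hc
      rw [if_neg hor]
      simp [List.getD_eq_getElem?_getD, hjN]

theorem pv_scan_getD0 (n : Int) (arr : List Int) (ans : List (List Char))
    (h0 : ∀ k : Nat, ans.length ≤ k → arr.getD k 0 = 0) (i : Nat) (hi : i < ans.length) :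
    (pvScan n arr ans).getD i []
      = if i < arr.length then
          pvRF (PySem.Chars.zfill (PySem.Int.toBinChars (arr.getD i 0)) n) (0 : Int)
            (ans.getD i [])
        else ans.getD i [] := by
  have h := pv_scan_getD n arr 0 ans (by simpa using h0) i hi
  simp only [Nat.cast_zero, Nat.zero_add, Nat.zero_le, true_and, Nat.sub_zero] at h
  simpa [pvScan] using h

theorem pv_scan_length0 (n : Int) (arr : List Int) (ans : List (List Char)) :
    (pvScan n arr ans).length = ans.length := by
  have h := pv_scan_length n arr 0 ans
  simp only [Nat.cast_zero] at h
  simpa [pvScan] using h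

-- one full marking pass, written uniformly with B's `getD i 0` (rows beyond the list, and rows
-- whose entry is 0, are untouched — exactly as marking with the all-'0' string of 0 leaves them)
theorem pv_scan_row (n : Int) (arr : List Int) (ans : List (List Char))
    (h1 : ∀ v ∈ arr.drop n.toNat, v = 0)
    (h3 : ans.length = n.toNat)
    (i : Nat) (hiN : i < n.toNat) (h4 : n.toNat ≤ (ans.getD i []).length) :
    (pvScan n arr ans).getD i []
      = pvRF (PySem.Chars.zfill (PySem.Int.toBinChars (arr.getD i 0)) n) (0 : Int)
          (ans.getD i []) := by
  rw [pv_scan_getD0 n arr ans (fun k hk => pv_drop_getD arr n.toNat h1 k (by omega)) i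
      (by omega)]
  by_cases hi : i < arr.length
  · rw [if_pos hi]
  · rw [if_neg hi]
    have h0 : arr.getD i 0 = 0 := List.getD_eq_default _ _ (by omega)
    rw [h0, pv_zfill_zero n (by omega), pvRF_zeros n.toNat _ h4]

-- the zero-filled binary string of row i has exactly n columns under Pre_
theorem pv_zlen (n : Int) (arr : List Int)
    (h2 : ∀ v ∈ arr, v ≠ 0 → (PySem.Int.toBinChars v).length ≤ n.toNat)
    (i : Nat) (hiN : i < n.toNat) :
    (PySem.Chars.zfill (PySem.Int.toBinChars (arr.getD i 0)) n).length = n.toNat := by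
  rw [PySem.Chars.length_zfill]
  by_cases hz : arr.getD i 0 = 0
  · rw [hz, show PySem.Int.toBinChars 0 = ['0'] from by decide]
    exact Nat.max_eq_right (by simp; omega)
  · have hi : i < arr.length := by
      by_contra hc
      exact hz (List.getD_eq_default _ _ (by omega))
    have hmem : arr.getD i 0 ∈ arr := by
      rw [List.getD_eq_getElem arr 0 hi]; exact List.getElem_mem hi
    exact Nat.max_eq_right (h2 _ hmem hz)

-- ===== VERDICT (by name: the statement is the Claim_ definition above) =====
theorem solution_spec : Claim_equal_solution := by
  intro n arr1 arr2 _ hpre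
  obtain ⟨hd1, hd2, hv⟩ := hpre
  have hv1 : ∀ v ∈ arr1, v ≠ 0 → (PySem.Int.toBinChars v).length ≤ n.toNat := fun v hm =>
    hv v (List.mem_append.2 (Or.inl hm))
  have hv2 : ∀ v ∈ arr2, v ≠ 0 → (PySem.Int.toBinChars v).length ≤ n.toNat := fun v hm =>
    hv v (List.mem_append.2 (Or.inr hm))
  show solution n arr1 arr2 = solution_alt n arr1 arr2
  simp only [solution, solution_alt]
  have hg0 : ∀ i : Nat, i < n.toNat →
      (List.replicate n.toNat (List.replicate n.toNat ' ')).getD i [] =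
        List.replicate n.toNat ' ' := by
    intro i hi
    simp [List.getD_eq_getElem?_getD, hi]
  have hg1len : (pvScan n arr1 (List.replicate n.toNat (List.replicate n.toNat ' '))).length
      = n.toNat := by rw [pv_scan_length0]; simp
  have hg1 : ∀ i : Nat, i < n.toNat →
      (pvScan n arr1 (List.replicate n.toNat (List.replicate n.toNat ' '))).getD i []
        = pvRF (PySem.Chars.zfill (PySem.Int.toBinChars (arr1.getD i 0)) n) (0 : Int)
            (List.replicate n.toNat ' ') := by
    intro i hi
    rw [pv_scan_row n arr1 _ hd1 (by simp) i hi (by rw [hg0 i hi]; simp), hg0 i hi]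
  have hg2len : (pvScan n arr2 (pvScan n arr1
      (List.replicate n.toNat (List.replicate n.toNat ' ')))).length = n.toNat := by
    rw [pv_scan_length0]; exact hg1len
  have hg2 : ∀ i : Nat, i < n.toNat →
      (pvScan n arr2 (pvScan n arr1
          (List.replicate n.toNat (List.replicate n.toNat ' ')))).getD i []
        = pvRF (PySem.Chars.zfill (PySem.Int.toBinChars (arr2.getD i 0)) n) (0 : Int)
            (pvRF (PySem.Chars.zfill (PySem.Int.toBinChars (arr1.getD i 0)) n) (0 : Int)
              (List.replicate n.toNat ' ')) := by
    intro i hi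
    rw [pv_scan_row n arr2 _ hd2 hg1len i hi
        (by rw [hg1 i hi, pvRF_length0]; simp), hg1 i hi]
  apply List.ext_getElem (by simp [hg2len])
  intro j hj hj'
  have hjN : j < n.toNat := by simpa [hg2len] using hj
  rw [List.getElem_map, List.getElem_map, List.getElem_range]
  simp only [pvRow]
  congr 1
  rw [← List.getD_eq_getElem _ [] (by rw [hg2len]; exact hjN), hg2 j hjN,
    pv_merge_rows n.toNat _ _ (pv_zlen n arr1 hv1 j hjN) (pv_zlen n arr2 hv2 j hjN)]
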